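-- pv_equiv track=rewrite | github.com/morpheuskn/Trabalhos-de-Computa-o-1 | .github/workflows/lista4izacdepaula.py | envio4
-- ===== SOURCE A (Python) =====
-- def envio4 (dias,chips,chipac):
--   pacotes = 0
--   resto = 0
--   chipspdia = [chips] * dias
--   pacotespdia = []
--   vezes = 0
--   producaopdia = 0
--   pacotenviados = 0
--   while vezes < dias:
--     producaopdia = chipspdia [vezes] + resto
--     pacotenviados = producaopdia // chipac
--     pacotespdia.append (pacotenviados)
--     pacotes += pacotenviados
--     resto = producaopdia % chipac
--     vezes += 1
--   return pacotes
-- ===== SOURCE B (Python) =====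
-- # Closed form: total packages over `dias` days equals (dias*chips)//chipac (carry cancels telescopically); 0 when no days.
-- def envio4(dias, chips, chipac):
--     if dias <= 0:
--         return 0
--     return (dias * chips) // chipac
-- ===== Notes on version B (the rewrite author's own statement) =====
-- stated objective: faster
-- what changed: Replaces the day-by-day loop carrying the remainder with the closed form (dias*chips)//chipac (the carried remainder telescopes), returning 0 when dias <= 0.
import Mathlib
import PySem

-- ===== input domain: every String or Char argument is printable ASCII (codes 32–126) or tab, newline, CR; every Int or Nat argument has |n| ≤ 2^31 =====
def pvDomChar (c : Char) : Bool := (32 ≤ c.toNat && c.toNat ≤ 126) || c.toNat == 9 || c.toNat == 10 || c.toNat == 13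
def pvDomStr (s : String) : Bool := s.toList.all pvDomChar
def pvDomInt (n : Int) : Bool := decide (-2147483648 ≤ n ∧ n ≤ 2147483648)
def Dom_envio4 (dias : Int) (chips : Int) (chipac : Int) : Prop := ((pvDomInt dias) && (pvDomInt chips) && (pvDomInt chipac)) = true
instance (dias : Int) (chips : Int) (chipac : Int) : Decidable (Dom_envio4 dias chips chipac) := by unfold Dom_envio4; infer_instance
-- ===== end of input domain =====

-- B replaces A's day-by-day remainder-carrying loop by the closed form (dias*chips)//chipac (objective: faster).

-- ===== PORT A =====
-- the while loop; the unused pacotespdia list of A is dropped (it never affects the result)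
def envio4Loop (chipspdia : List Int) (dias chipac vezes pacotes resto : Int) : Int :=
  if vezes < dias then
    let producaopdia := (PySem.List.pyGet? chipspdia vezes).getD 0 + resto
    let pacotenviados := PySem.Int.floordiv producaopdia chipac
    envio4Loop chipspdia dias chipac (vezes + 1) (pacotes + pacotenviados)
      (PySem.Int.mod producaopdia chipac)
  else pacotes
termination_by (dias - vezes).toNat
decreasing_by omega

def envio4 (dias : Int) (chips : Int) (chipac : Int) : Int :=
  envio4Loop (List.replicate dias.toNat chips) dias chipac 0 0 0

-- ===== PORT B =====
def envio4_alt (dias : Int) (chips : Int) (chipac : Int) : Int :=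
  if dias ≤ 0 then 0
  else PySem.Int.floordiv (dias * chips) chipac

-- ===== PRECONDITION & SPEC =====
-- A (and B) raise ZeroDivisionError when the loop runs (dias > 0) with chipac = 0; only that is excluded.
def Pre_envio4 (dias : Int) (chips : Int) (chipac : Int) : Prop := dias ≤ 0 ∨ chipac ≠ 0
instance (dias : Int) (chips : Int) (chipac : Int) : Decidable (Pre_envio4 dias chips chipac) := by unfold Pre_envio4; infer_instance
def pvWitness_envio4 : Int × Int × Int := (5, 7, 3)

def Spec_envio4 (dias : Int) (chips : Int) (chipac : Int) (out : Int) : Prop := out = envio4_alt dias chips chipac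
instance (dias : Int) (chips : Int) (chipac : Int) (out : Int) : Decidable (Spec_envio4 dias chips chipac out) := by unfold Spec_envio4; infer_instance

-- ===== CLAIM (what is proved, stated in full; the proofs are below) =====
def Claim_equal_envio4 : Prop := ∀ (dias : Int) (chips : Int) (chipac : Int), Dom_envio4 dias chips chipac → Pre_envio4 dias chips chipac → Spec_envio4 dias chips chipac (envio4 dias chips chipac)

-- ===== LEMMAS AND PROOFS =====

-- shift: adding a multiple of the divisor shifts the floor quotient
theorem fdiv_shift (x q c : Int) (hc : c ≠ 0) :
    PySem.Int.floordiv (x + q * c) c = PySem.Int.floordiv x c + q :=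
  Int.add_mul_fdiv_right x q hc

-- a Python remainder divides to 0
theorem fdiv_mod_zero (a c : Int) (hc : c ≠ 0) :
    PySem.Int.floordiv (PySem.Int.mod a c) c = 0 := by
  have h : PySem.Int.mod a c = a + (-(PySem.Int.floordiv a c)) * c := by
    show Int.fmod a c = a + (-(Int.fdiv a c)) * c
    rw [Int.fmod_def]; ring
  rw [h, fdiv_shift _ _ _ hc]; omega

theorem loop_invariant (chips chipac : Int) (hc : chipac ≠ 0) :
    ∀ (n : Nat) (dias vezes pacotes resto : Int), 0 ≤ vezes → dias - vezes = (n : Int) →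
      PySem.Int.floordiv resto chipac = 0 →
      envio4Loop (List.replicate dias.toNat chips) dias chipac vezes pacotes resto
        = pacotes + PySem.Int.floordiv ((n : Int) * chips + resto) chipac := by
  intro n
  induction n with
  | zero =>
    intro dias vezes pacotes resto hv hd hr
    rw [envio4Loop]
    simp only [if_neg (by omega : ¬ vezes < dias), Nat.cast_zero, zero_mul, zero_add, hr]
    simp
  | succ m ih =>
    intro dias vezes pacotes resto hv hd hr
    rw [envio4Loop]
    simp only [if_pos (by omega : vezes < dias)]
    have hget : (PySem.List.pyGet? (List.replicate dias.toNat chips) vezes).getD 0 = chips := by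
      have h1 : vezes < dias := by omega
      simp [PySem.List.pyGet?, PySem.List.pyIdx?, hv, h1, List.getElem?_replicate]
    rw [hget]
    rw [ih dias (vezes + 1) _ _ (by omega) (by push_cast; omega)
      (fdiv_mod_zero (chips + resto) chipac hc)]
    have hmod : PySem.Int.mod (chips + resto) chipac
        = chips + resto + (-(PySem.Int.floordiv (chips + resto) chipac)) * chipac := by
      show Int.fmod _ _ = chips + resto + (-(Int.fdiv (chips + resto) chipac)) * chipac
      rw [Int.fmod_def]; ring
    rw [hmod]
    have : ((m : Int) * chips + (chips + resto + -PySem.Int.floordiv (chips + resto) chipac * chipac))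
        = ((m : Int) + 1) * chips + resto + (-(PySem.Int.floordiv (chips + resto) chipac)) * chipac := by ring
    rw [this, fdiv_shift _ _ _ hc]
    push_cast
    ring

-- ===== VERDICT (by name: the statement is the Claim_ definition above) =====
theorem envio4_spec : Claim_equal_envio4 := by
  intro dias chips chipac _ hpre
  unfold Spec_envio4 envio4 envio4_alt
  by_cases hd : dias ≤ 0
  · rw [envio4Loop]
    simp [if_neg (by omega : ¬ (0:Int) < dias), if_pos hd]
  · have hc : chipac ≠ 0 := hpre.resolve_left hd
    rw [loop_invariant chips chipac hc dias.toNat dias 0 0 0 le_rfl (by omega)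
      (by show Int.fdiv 0 chipac = 0; simp)]
    rw [if_neg hd]
    have : ((dias.toNat : Int)) = dias := by omega
    rw [this]
    ring_nf
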